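-- pv_equiv track=rewrite | github.com/jiayi-ren/cs-module-project-recursive-sorting | src/searching/searching.py | agnostic_binary_search
-- ===== SOURCE A (Python) =====
-- def agnostic_binary_search(arr, target):
--     # Your code here
--     if len(arr) == 0:
--         return -1
--
--     left = 0
--     right = len(arr) -1
--     is_ascending = arr[left] < arr[right]
--     while left <= right:
--         pivot = left+ (right - left)//2
--         if arr[pivot] == target:
--             return pivot
--         if is_ascending:
--             if arr[pivot] > target:
--                 right = pivot -1
--             elif arr[pivot] < target:
--                 left = pivot +1
--         else:
--             if arr[pivot] > target:
--                 left = pivot+1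
--             elif arr[pivot] < target:
--                 right = pivot-1
--
--     return -1  # not found
-- ===== SOURCE B (Python) =====
-- def agnostic_binary_search(arr, target):
--     if not arr:
--         return -1
--     # Multiply by -1 in the descending case: one ascending search covers both orders.
--     sign = 1 if arr[0] < arr[-1] else -1
--     t = sign * target
--
--     def go(lo, hi):
--         if lo > hi:
--             return -1
--         mid = (lo + hi) // 2
--         v = sign * arr[mid]
--         if v < t:
--             return go(mid + 1, hi)
--         if v > t:
--             return go(lo, mid - 1)
--         return mid
--
--     return go(0, len(arr) - 1)
-- ===== Notes on version B (the rewrite author's own statement) =====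
-- stated objective: simpler
-- what changed: Eliminates A's duplicated ascending/descending four-branch ladder by sign-normalizing the values (multiply by -1 when descending) so one recursive ascending binary search with pivot (lo+hi)//2 handles both orders.
import Mathlib
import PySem

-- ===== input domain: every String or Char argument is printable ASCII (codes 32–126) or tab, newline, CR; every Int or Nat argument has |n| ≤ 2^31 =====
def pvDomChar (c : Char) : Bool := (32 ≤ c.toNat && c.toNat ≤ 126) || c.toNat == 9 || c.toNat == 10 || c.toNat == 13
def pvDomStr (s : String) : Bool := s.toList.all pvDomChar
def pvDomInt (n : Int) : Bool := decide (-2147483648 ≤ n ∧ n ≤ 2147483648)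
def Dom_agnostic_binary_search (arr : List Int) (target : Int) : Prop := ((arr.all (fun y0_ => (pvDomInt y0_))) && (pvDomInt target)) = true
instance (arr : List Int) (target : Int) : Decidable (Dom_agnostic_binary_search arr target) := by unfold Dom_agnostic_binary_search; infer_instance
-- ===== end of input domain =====

-- B sign-normalizes the values (multiply by -1 when descending) so one recursive
-- ascending binary search replaces A's duplicated asc/desc branch ladder (objective: simpler).

-- ===== PORT A =====
-- A's while-loop, transliterated with Nat fuel (the interval shrinks each iteration, so
-- arr.length + 1 steps always suffice; the fuel-0 branch is unreachable).
-- arr[pivot] is always in range (0 <= left <= pivot <= right < len), so `.getD 0` is exact.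
def absLoop (arr : List Int) (target : Int) (isAsc : Bool) (left right : Int) : Nat → Int
  | 0 => -1
  | fuel + 1 =>
    if left ≤ right then
      let pivot := left + PySem.Int.floordiv (right - left) 2
      let v := (PySem.List.pyGet? arr pivot).getD 0
      if v = target then pivot
      else if isAsc then
        if v > target then absLoop arr target isAsc left (pivot - 1) fuel
        else if v < target then absLoop arr target isAsc (pivot + 1) right fuel
        else absLoop arr target isAsc left right fuel
      else
        if v > target then absLoop arr target isAsc (pivot + 1) right fuel
        else if v < target then absLoop arr target isAsc left (pivot - 1) fuel
        else absLoop arr target isAsc left right fuel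
    else -1

def agnostic_binary_search (arr : List Int) (target : Int) : Int :=
  if arr.length = 0 then -1
  else
    let left : Int := 0
    let right : Int := (arr.length : Int) - 1
    let isAsc := ((PySem.List.pyGet? arr left).getD 0) < ((PySem.List.pyGet? arr right).getD 0)
    absLoop arr target isAsc left right (arr.length + 1)

-- ===== PORT B =====
-- B's recursive helper `go(lo, hi)` over sign-normalized values, same fuel bound.
def absGo (arr : List Int) (t sign : Int) : Int → Int → Nat → Int
  | _, _, 0 => -1
  | lo, hi, fuel + 1 =>
    if lo > hi then -1
    else
      let mid := PySem.Int.floordiv (lo + hi) 2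
      let v := sign * (PySem.List.pyGet? arr mid).getD 0
      if v < t then absGo arr t sign (mid + 1) hi fuel
      else if v > t then absGo arr t sign lo (mid - 1) fuel
      else mid

def agnostic_binary_search_alt (arr : List Int) (target : Int) : Int :=
  if arr = [] then -1
  else
    let sign : Int :=
      if ((PySem.List.pyGet? arr 0).getD 0) < ((PySem.List.pyGet? arr (-1)).getD 0) then 1 else -1
    absGo arr (sign * target) sign 0 ((arr.length : Int) - 1) (arr.length + 1)

-- ===== PRECONDITION & SPEC =====
def Spec_agnostic_binary_search (arr : List Int) (target : Int) (out : Int) : Prop := out = agnostic_binary_search_alt arr target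
instance (arr : List Int) (target : Int) (out : Int) : Decidable (Spec_agnostic_binary_search arr target out) := by unfold Spec_agnostic_binary_search; infer_instance

-- ===== CLAIM (what is proved, stated in full; the proofs are below) =====
def Claim_equal_agnostic_binary_search : Prop := ∀ (arr : List Int) (target : Int), Dom_agnostic_binary_search arr target → Spec_agnostic_binary_search arr target (agnostic_binary_search arr target)

-- ===== LEMMAS AND PROOFS =====
theorem floordiv_mid (lo hi : Int) :
    PySem.Int.floordiv (lo + hi) 2 = lo + PySem.Int.floordiv (hi - lo) 2 := by
  simp only [PySem.Int.floordiv]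
  have h : lo + hi = (hi - lo) + lo * 2 := by ring
  rw [h, Int.add_mul_fdiv_right (hi - lo) lo (by norm_num : (2:Int) ≠ 0)]
  ring

theorem absLoop_eq_absGo (arr : List Int) (target : Int) (isAsc : Bool)
    (fuel : Nat) (left right : Int) :
    absLoop arr target isAsc left right fuel
      = absGo arr ((if isAsc then (1:Int) else -1) * target) (if isAsc then 1 else -1)
          left right fuel := by
  induction fuel generalizing left right with
  | zero => rfl
  | succ fuel ih =>
    cases isAsc <;>
      simp only [absLoop, absGo, floordiv_mid, gt_iff_lt, Bool.false_eq_true,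
        if_true, if_false] <;>
      split_ifs <;>
      first
      | rfl
      | exact ih _ _
      | omega

theorem pyGet_last (arr : List Int) (h : arr.length ≠ 0) :
    (PySem.List.pyGet? arr ((arr.length : Int) - 1)).getD 0
      = (PySem.List.pyGet? arr (-1)).getD 0 := by
  rw [PySem.List.pyGet?_neg_one]
  have h1 : ((arr.length : Int) - 1) = ((arr.length - 1 : Nat) : Int) := by omega
  rw [h1, PySem.List.pyGet?_natCast, List.getLast?_eq_getElem?]

-- ===== VERDICT (by name: the statement is the Claim_ definition above) =====
theorem agnostic_binary_search_spec : Claim_equal_agnostic_binary_search := by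
  intro arr target _
  unfold Spec_agnostic_binary_search agnostic_binary_search agnostic_binary_search_alt
  by_cases h : arr = []
  · subst h; rfl
  · have hne : arr.length ≠ 0 := by simpa [List.length_eq_zero_iff] using h
    rw [if_neg hne, if_neg h]
    simp only [pyGet_last arr hne]
    rw [absLoop_eq_absGo arr target _ (arr.length + 1) 0 ((arr.length : Int) - 1)]
    by_cases hc : ((PySem.List.pyGet? arr 0).getD 0) < ((PySem.List.pyGet? arr (-1)).getD 0) <;>
      simp [hc]
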